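-- pv_equiv track=rewrite | github.com/charlesneimog/pd-ji | pd-ji.py | diamond_identities
-- ===== SOURCE A (Python) =====
-- def diamond_identities(identities):
--     """
--     Returns two lists of lists representing the otonality and utonality matrices of a Partch's diamond, but here you choose the identities.
--
--     Args:
--     - identities: One list of integers representing the identities of the diamond.
--
--     Returns:
--     - A list of two lists of lists of strings representing the otonality and utonality matrices of the diamond. The first list contains the otonality matrix, and the second list contains the utonality matrix.
--     """
--
--     otonal = []
--     utonal = []
--     for i in identities:
--         otonality = []
--         utonality = []
--         for j in identities:
--             otonality.append(f"{j}/{i}")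
--             utonality.append(f"{i}/{j}")
--         otonal.append(otonality)
--         utonal.append(utonality)
--     return [otonal, utonal]
-- ===== SOURCE B (Python) =====
-- def diamond_identities(identities):
--     otonal = [[f"{j}/{i}" for j in identities] for i in identities]
--     utonal = [list(row) for row in zip(*otonal)]
--     return [otonal, utonal]
-- ===== Notes on version B (the rewrite author's own statement) =====
-- stated objective: simpler
-- what changed: B builds only the otonality matrix with a comprehension and obtains the utonality matrix as its transpose via zip(*otonal), instead of filling both matrices in one doubled nested loop.
import Mathlib
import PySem

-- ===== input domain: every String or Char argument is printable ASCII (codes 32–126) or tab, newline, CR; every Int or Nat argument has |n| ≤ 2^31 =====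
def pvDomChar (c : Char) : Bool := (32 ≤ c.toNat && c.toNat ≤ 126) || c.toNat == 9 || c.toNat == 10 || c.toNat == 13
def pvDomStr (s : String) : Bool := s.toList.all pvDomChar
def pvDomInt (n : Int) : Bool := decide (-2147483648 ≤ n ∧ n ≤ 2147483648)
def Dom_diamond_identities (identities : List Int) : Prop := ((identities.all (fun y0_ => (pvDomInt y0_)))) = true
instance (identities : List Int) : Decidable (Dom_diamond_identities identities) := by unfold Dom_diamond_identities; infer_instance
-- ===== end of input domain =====

-- B builds only the otonality matrix and obtains the utonality matrix as its transpose
-- (zip(*otonal)), replacing A's doubled nested loop; objective: simpler.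

-- ===== PORT A =====
def diamond_identities (identities : List Int) : List (List (List String)) :=
  let p := identities.foldl (fun (acc : List (List String) × List (List String)) i =>
    let q := identities.foldl (fun (acc2 : List String × List String) j =>
      (acc2.1 ++ [PySem.Int.toStr j ++ "/" ++ PySem.Int.toStr i],
       acc2.2 ++ [PySem.Int.toStr i ++ "/" ++ PySem.Int.toStr j])) ([], [])
    (acc.1 ++ [q.1], acc.2 ++ [q.2])) ([], [])
  [p.1, p.2]

-- ===== PORT B =====
-- zipT is the port of Python's zip(*rows): take heads while every row is nonempty
def zipT (rows : List (List String)) : List (List String) :=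
  if h : rows ≠ [] ∧ rows.all (fun r => !r.isEmpty) then
    rows.map (fun r => r.headD "") :: zipT (rows.map (fun r => r.tail))
  else []
termination_by (rows.map List.length).sum
decreasing_by
  rcases rows with _ | ⟨r, rs⟩
  · exact absurd rfl h.1
  · simp only [List.all_cons, Bool.and_eq_true, List.isEmpty_eq_false_iff, Bool.not_eq_eq_eq_not,
      Bool.not_false] at h
    have hr : r ≠ [] := by simpa using h.2.1
    have h1 : r.tail.length < r.length := by
      cases r with
      | nil => exact absurd rfl hr
      | cons a t => simp
    have hle : ((rs.map (fun x => x.length - 1)).sum) ≤ (rs.map List.length).sum := by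
      apply List.sum_le_sum
      intro x _
      omega
    have h2 : 1 ≤ r.length := by
      cases r with
      | nil => exact absurd rfl hr
      | cons a t => simp
    simp only [List.map_cons, List.map_map, List.sum_cons, Function.comp_def,
      List.attach_cons]
    simp
    omega
def diamond_identities_alt (identities : List Int) : List (List (List String)) :=
  let otonal := identities.map (fun i => identities.map (fun j => PySem.Int.toStr j ++ "/" ++ PySem.Int.toStr i))
  let utonal := zipT otonal
  [otonal, utonal]

-- ===== PRECONDITION & SPEC =====
def Spec_diamond_identities (identities : List Int) (out : List (List (List String))) : Prop := out = diamond_identities_alt identities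
instance (identities : List Int) (out : List (List (List String))) : Decidable (Spec_diamond_identities identities out) := by unfold Spec_diamond_identities; infer_instance

-- ===== CLAIM (what is proved, stated in full; the proofs are below) =====
def Claim_equal_diamond_identities : Prop := ∀ (identities : List Int), Dom_diamond_identities identities → Spec_diamond_identities identities (diamond_identities identities)

-- ===== LEMMAS AND PROOFS =====

-- the inner fold of A appends "j/i" to the first and "i/j" to the second component: it is a map
lemma inner_fold_eq (l : List Int) (i : Int) : ∀ (a b : List String),
    l.foldl (fun (acc2 : List String × List String) j =>
      (acc2.1 ++ [PySem.Int.toStr j ++ "/" ++ PySem.Int.toStr i],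
       acc2.2 ++ [PySem.Int.toStr i ++ "/" ++ PySem.Int.toStr j])) (a, b)
    = (a ++ l.map (fun j => PySem.Int.toStr j ++ "/" ++ PySem.Int.toStr i),
       b ++ l.map (fun j => PySem.Int.toStr i ++ "/" ++ PySem.Int.toStr j)) := by
  induction l with
  | nil => simp
  | cons x xs ih =>
      intro a b
      simp only [List.foldl_cons, ih, List.map_cons]
      simp

-- the outer fold of A collects the two families of rows
lemma outer_fold_eq (k : List Int) : ∀ (l : List Int) (a b : List (List String)),
    l.foldl (fun (acc : List (List String) × List (List String)) i =>
      let q := k.foldl (fun (acc2 : List String × List String) j =>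
        (acc2.1 ++ [PySem.Int.toStr j ++ "/" ++ PySem.Int.toStr i],
         acc2.2 ++ [PySem.Int.toStr i ++ "/" ++ PySem.Int.toStr j])) ([], [])
      (acc.1 ++ [q.1], acc.2 ++ [q.2])) (a, b)
    = (a ++ l.map (fun i => k.map (fun j => PySem.Int.toStr j ++ "/" ++ PySem.Int.toStr i)),
       b ++ l.map (fun i => k.map (fun j => PySem.Int.toStr i ++ "/" ++ PySem.Int.toStr j))) := by
  intro l
  induction l with
  | nil => simp
  | cons x xs ih =>
      intro a b
      simp only [List.foldl_cons, inner_fold_eq, List.nil_append] at ih ⊢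
      rw [ih]
      simp

-- transposing a square map-of-maps matrix by repeatedly taking heads
lemma zipT_map_map (k l : List Int) (f : Int → Int → String) (hk : k ≠ []) :
    zipT (k.map fun i => l.map (f i)) = l.map fun j => k.map fun i => f i j := by
  induction l with
  | nil =>
      rw [zipT]
      rcases k with _ | ⟨x, ks⟩
      · exact absurd rfl hk
      · simp
  | cons j l' ih =>
      rw [zipT]
      rw [dif_pos]
      · simp only [List.map_map, Function.comp_def, List.map_cons, List.headD_cons, List.tail_cons]
        rw [ih]
      · constructor
        · simpa using hk
        · simp

theorem diamond_identities_spec : Claim_equal_diamond_identities := by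
  intro l _
  unfold Spec_diamond_identities diamond_identities diamond_identities_alt
  simp only [outer_fold_eq, List.nil_append]
  rcases eq_or_ne l [] with rfl | hl
  · rw [zipT]; simp
  · rw [zipT_map_map l l (fun i j => PySem.Int.toStr j ++ "/" ++ PySem.Int.toStr i) hl]
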